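-- pv_equiv track=rewrite | github.com/queelius/computational-explorations | src/coprime_ramsey_sat.py | validate_avoiding_coloring
-- ===== SOURCE A (Python) =====
-- import math
-- from typing import List, Tuple, Dict, Optional, Set
--
-- def find_coprime_cliques(n: int, k: int) -> List[Tuple[int, ...]]:
--     """
--     Enumerate all k-cliques in the coprime graph on [n].
--
--     A k-clique is a set of k vertices that are pairwise coprime.
--     """
--     if k < 1:
--         return []
--     if k == 1:
--         return [(v,) for v in range(1, n + 1)]
--
--     vertices = list(range(1, n + 1))
--     cliques = []
--
--     # Build adjacency for coprimality
--     adj = {v: set() for v in vertices}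
--     for i in vertices:
--         for j in vertices:
--             if i < j and math.gcd(i, j) == 1:
--                 adj[i].add(j)
--                 adj[j].add(i)
--
--     # Enumerate cliques by extension: start from sorted vertex lists
--     # to avoid duplicates. Use recursive backtracking with pruning.
--     def extend(current: List[int], candidates: List[int]):
--         if len(current) == k:
--             cliques.append(tuple(current))
--             return
--         needed = k - len(current)
--         for idx, v in enumerate(candidates):
--             if len(candidates) - idx < needed:
--                 break  # Not enough candidates left
--             # v must be coprime with all current members
--             if all(v in adj[u] for u in current):
--                 # Remaining candidates are those after v that are adjacent to v
--                 new_candidates = [w for w in candidates[idx + 1:] if w in adj[v]]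
--                 extend(current + [v], new_candidates)
--
--     extend([], vertices)
--     return cliques
--
-- def validate_avoiding_coloring(n: int, k: int, coloring: Dict[Tuple[int, int], int]) -> bool:
--     """
--     Validate that a coloring of coprime edges on [n] avoids monochromatic K_k.
--
--     Returns True if the coloring is valid (no monochromatic K_k).
--     """
--     cliques = find_coprime_cliques(n, k)
--     for clique in cliques:
--         vlist = sorted(clique)
--         colors = set()
--         for i in range(len(vlist)):
--             for j in range(i + 1, len(vlist)):
--                 edge = (vlist[i], vlist[j])
--                 colors.add(coloring.get(edge, -1))
--         if len(colors) == 1 and -1 not in colors: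
--             return False  # Monochromatic clique found
--     return True
-- ===== SOURCE B (Python) =====
-- import math
--
--
-- def _combinations(items, r):
--     """All r-element subsets of items (a list), as tuples, in lexicographic order."""
--     if r == 0:
--         return [()]
--     if len(items) < r:
--         return []
--     head, rest = items[0], items[1:]
--     return [(head,) + t for t in _combinations(rest, r - 1)] + _combinations(rest, r)
--
--
-- def validate_avoiding_coloring(n, k, coloring):
--     if k < 1:
--         return True
--     for subset in _combinations(list(range(1, n + 1)), k):
--         if all(math.gcd(a, b) == 1 for a, b in _combinations(list(subset), 2)):
--             colors = {coloring.get((a, b), -1) for a, b in _combinations(list(subset), 2)}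
--             if len(colors) == 1 and -1 not in colors:
--                 return False
--     return True
-- ===== Notes on version B (the rewrite author's own statement) =====
-- stated objective: simpler
-- what changed: Replaces A's adjacency-dict construction plus recursive backtracking clique enumeration by a flat generate-and-filter pass: enumerate all k-combinations of 1..n and test pairwise coprimality and edge colors per subset.
import Mathlib
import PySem

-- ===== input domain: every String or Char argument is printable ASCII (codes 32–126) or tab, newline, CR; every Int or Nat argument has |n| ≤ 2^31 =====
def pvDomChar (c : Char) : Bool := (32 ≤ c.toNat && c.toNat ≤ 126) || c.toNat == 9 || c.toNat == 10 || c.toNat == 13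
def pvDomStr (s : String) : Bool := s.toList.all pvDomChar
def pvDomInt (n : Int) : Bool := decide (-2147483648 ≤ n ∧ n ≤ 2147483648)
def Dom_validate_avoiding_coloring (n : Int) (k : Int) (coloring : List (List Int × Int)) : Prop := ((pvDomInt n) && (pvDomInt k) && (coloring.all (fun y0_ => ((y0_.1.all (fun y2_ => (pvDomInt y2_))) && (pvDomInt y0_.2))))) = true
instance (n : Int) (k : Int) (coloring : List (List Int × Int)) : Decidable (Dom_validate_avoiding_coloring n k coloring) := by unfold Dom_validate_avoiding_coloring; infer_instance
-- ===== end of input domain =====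

-- B replaces A's recursive adjacency-pruned backtracking clique search by a flat
-- generate-and-filter pass over all k-combinations (objective: simpler).

-- ===== PORT A =====
-- adj = {v: set() for v in vertices}
def fccAdjInit (vertices : List Int) : PySem.Dict Int (PySem.Set Int) :=
  vertices.foldl (fun d v => d.insert v PySem.Set.empty) PySem.Dict.empty

-- for i in vertices: for j in vertices: if i < j and gcd(i,j)==1: adj[i].add(j); adj[j].add(i)
-- (adj[i] / adj[j] always exist, so Dict.modify with default ∅ is exact here)
def fccAdjBuild (vertices : List Int) (adj0 : PySem.Dict Int (PySem.Set Int)) : PySem.Dict Int (PySem.Set Int) :=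
  vertices.foldl (fun d i =>
    vertices.foldl (fun d j =>
      if i < j && ((Int.gcd i j : Int) == 1) then
        ((d.modify i PySem.Set.empty (fun s => PySem.Set.add s j)).modify j PySem.Set.empty
          (fun s => PySem.Set.add s i))
      else d) d) adj0

-- the recursive `extend(current, candidates)` of A, with its for/break loop as fccLoop
mutual
def fccExt (k : Int) (adj : PySem.Dict Int (PySem.Set Int)) (current : List Int)
    (candidates : List Int) : List (List Int) :=
  if (current.length : Int) == k then [current]
  else fccLoop k adj current candidates
  termination_by (candidates.length, 1)
  decreasing_by omega
def fccLoop (k : Int) (adj : PySem.Dict Int (PySem.Set Int)) (current : List Int)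
    (candidates : List Int) : List (List Int) :=
  match candidates with
  | [] => []
  | v :: rest =>
    if ((v :: rest).length : Int) < k - (current.length : Int) then []  -- the `break`
    else
      (if current.all (fun u => PySem.Set.contains (adj.getD u PySem.Set.empty) v) then
        fccExt k adj (current ++ [v])
          (rest.filter (fun w => PySem.Set.contains (adj.getD v PySem.Set.empty) w))
      else []) ++ fccLoop k adj current rest
  termination_by (candidates.length, 0)
  decreasing_by
    · simp_wf
      have := List.length_filter_le (fun w => decide (w ∈ adj.getD v [])) rest
      omega
    · simp_wf; omega
end

def find_coprime_cliques (n : Int) (k : Int) : List (List Int) :=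
  if k < 1 then []
  else if k == 1 then (PySem.List.pyRange 1 (n + 1) 1).map (fun v => [v])
  else
    let vertices := PySem.List.pyRange 1 (n + 1) 1
    let adj := fccAdjBuild vertices (fccAdjInit vertices)
    fccExt k adj [] vertices

-- colors = set(); for i in range(len(vlist)): for j in range(i+1, len(vlist)): colors.add(coloring.get((vlist[i], vlist[j]), -1))
-- (vlist[i]/vlist[j] are always in range, so pyGetD is exact)
def vacColors (d : PySem.Dict (List Int) Int) (vlist : List Int) : PySem.Set Int :=
  (PySem.List.pyRange 0 (vlist.length : Int) 1).foldl (fun cs i =>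
    (PySem.List.pyRange (i + 1) (vlist.length : Int) 1).foldl (fun cs j =>
      PySem.Set.add cs (d.getD [PySem.List.pyGetD vlist i 0, PySem.List.pyGetD vlist j 0] (-1))) cs)
    PySem.Set.empty

def vacLoop (d : PySem.Dict (List Int) Int) (cliques : List (List Int)) : Bool :=
  match cliques with
  | [] => true
  | c :: cs =>
    let vlist := PySem.List.sorted c (fun x => x) false
    let colors := vacColors d vlist
    if PySem.Set.len colors == 1 && !(PySem.Set.contains colors (-1)) then false
    else vacLoop d cs

def validate_avoiding_coloring (n : Int) (k : Int) (coloring : List (List Int × Int)) : Bool :=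
  vacLoop (PySem.Dict.mk coloring) (find_coprime_cliques n k)

-- ===== PORT B =====
-- _combinations(items, r): all r-element subsets as lists, lexicographic
def bCombs (r : Nat) (items : List Int) : List (List Int) :=
  if r = 0 then [[]]
  else if items.length < r then []
  else
    match items, r with
    | x :: rest, r' + 1 => (bCombs r' rest).map (fun t => x :: t) ++ bCombs (r' + 1) rest
    | _, _ => []  -- unreachable: both guards above already returned
termination_by items.length
decreasing_by all_goals simp

def bLoop (d : PySem.Dict (List Int) Int) (subsets : List (List Int)) : Bool :=
  match subsets with
  | [] => true
  | s :: ss =>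
    -- for a, b in _combinations(subset, 2): every pair is a 2-element list (default arm unreachable)
    if (bCombs 2 s).all (fun p => match p with | [a, b] => (Int.gcd a b : Int) == 1 | _ => true) then
      let colors : PySem.Set Int :=
        (bCombs 2 s).foldl (fun cs p => match p with
          | [a, b] => PySem.Set.add cs (d.getD [a, b] (-1))
          | _ => cs) PySem.Set.empty
      if PySem.Set.len colors == 1 && !(PySem.Set.contains colors (-1)) then false
      else bLoop d ss
    else bLoop d ss

def validate_avoiding_coloring_alt (n : Int) (k : Int) (coloring : List (List Int × Int)) : Bool :=
  if k < 1 then true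
  else bLoop (PySem.Dict.mk coloring) (bCombs k.toNat (PySem.List.pyRange 1 (n + 1) 1))

-- ===== PRECONDITION & SPEC =====
def Spec_validate_avoiding_coloring (n : Int) (k : Int) (coloring : List (List Int × Int)) (out : Bool) : Prop := out = validate_avoiding_coloring_alt n k coloring
instance (n : Int) (k : Int) (coloring : List (List Int × Int)) (out : Bool) : Decidable (Spec_validate_avoiding_coloring n k coloring out) := by unfold Spec_validate_avoiding_coloring; infer_instance

-- ===== CLAIM (what is proved, stated in full; the proofs are below) =====
def Claim_equal_validate_avoiding_coloring : Prop := ∀ (n : Int) (k : Int) (coloring : List (List Int × Int)), Dom_validate_avoiding_coloring n k coloring → Spec_validate_avoiding_coloring n k coloring (validate_avoiding_coloring n k coloring)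

-- ===== LEMMAS AND PROOFS =====

-- ---- adjacency dict: membership characterisation ----

-- membership in the adjacency dict, as a Prop
def pvMA (adj : PySem.Dict Int (PySem.Set Int)) (u w : Int) : Prop :=
  w ∈ adj.getD u PySem.Set.empty

lemma pvMA_step (d : PySem.Dict Int (PySem.Set Int)) (i j u w : Int) :
    pvMA (if i < j && ((Int.gcd i j : Int) == 1) then
        ((d.modify i PySem.Set.empty (fun s => PySem.Set.add s j)).modify j PySem.Set.empty
          (fun s => PySem.Set.add s i))
      else d) u w ↔
    pvMA d u w ∨ ((i < j ∧ (Int.gcd i j : Int) = 1) ∧ ((u = i ∧ w = j) ∨ (u = j ∧ w = i))) := by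
  unfold pvMA
  split_ifs with h
  · simp only [Bool.and_eq_true, decide_eq_true_eq, beq_iff_eq] at h
    have hij : i ≠ j := by omega
    simp only [PySem.Dict.getD_modify]
    by_cases hjq : u = j <;> by_cases hiq : u = i <;>
      simp [hjq, hiq, PySem.Set.mem_add, h, hij, Ne.symm hij]
  · simp only [Bool.and_eq_true, decide_eq_true_eq, beq_iff_eq, not_and] at h
    tauto

lemma pvMA_inner (i u w : Int) : ∀ (js : List Int) (d : PySem.Dict Int (PySem.Set Int)),
    pvMA (js.foldl (fun d j => if i < j && ((Int.gcd i j : Int) == 1) then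
        ((d.modify i PySem.Set.empty (fun s => PySem.Set.add s j)).modify j PySem.Set.empty
          (fun s => PySem.Set.add s i))
      else d) d) u w ↔
    pvMA d u w ∨ ∃ j ∈ js, ((i < j ∧ (Int.gcd i j : Int) = 1) ∧ ((u = i ∧ w = j) ∨ (u = j ∧ w = i)))
  | [], d => by simp
  | j :: js, d => by
    rw [List.foldl_cons, pvMA_inner i u w js, pvMA_step]
    simp only [List.mem_cons]
    constructor
    · rintro ((h | h) | ⟨j', hj', h⟩)
      · exact Or.inl h
      · exact Or.inr ⟨j, Or.inl rfl, h⟩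
      · exact Or.inr ⟨j', Or.inr hj', h⟩
    · rintro (h | ⟨j', (rfl | hj'), h⟩)
      · exact Or.inl (Or.inl h)
      · exact Or.inl (Or.inr h)
      · exact Or.inr ⟨j', hj', h⟩

lemma pvMA_outer (u w : Int) (js : List Int) : ∀ (is : List Int) (d : PySem.Dict Int (PySem.Set Int)),
    pvMA (is.foldl (fun d i => js.foldl (fun d j => if i < j && ((Int.gcd i j : Int) == 1) then
        ((d.modify i PySem.Set.empty (fun s => PySem.Set.add s j)).modify j PySem.Set.empty
          (fun s => PySem.Set.add s i))
      else d) d) d) u w ↔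
    pvMA d u w ∨ ∃ i ∈ is, ∃ j ∈ js, ((i < j ∧ (Int.gcd i j : Int) = 1) ∧ ((u = i ∧ w = j) ∨ (u = j ∧ w = i)))
  | [], d => by simp
  | i :: is, d => by
    rw [List.foldl_cons, pvMA_outer u w js is, pvMA_inner]
    simp only [List.mem_cons]
    constructor
    · rintro ((h | ⟨j, hj, h⟩) | ⟨i', hi', h⟩)
      · exact Or.inl h
      · exact Or.inr ⟨i, Or.inl rfl, j, hj, h⟩
      · exact Or.inr ⟨i', Or.inr hi', h⟩
    · rintro (h | ⟨i', (rfl | hi'), h⟩)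
      · exact Or.inl (Or.inl h)
      · exact Or.inl (Or.inr h)
      · exact Or.inr ⟨i', hi', h⟩

lemma pvAdjInit_getD : ∀ (l : List Int) (d : PySem.Dict Int (PySem.Set Int)),
    (∀ u, d.getD u PySem.Set.empty = PySem.Set.empty) →
    ∀ u, (l.foldl (fun d v => d.insert v PySem.Set.empty) d).getD u PySem.Set.empty = PySem.Set.empty
  | [], d, h, u => h u
  | v :: l, d, h, u => by
    rw [List.foldl_cons]
    refine pvAdjInit_getD l _ (fun u => ?_) u
    rw [PySem.Dict.getD_insert]
    split_ifs
    · rfl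
    · exact h u

lemma pvMA_adj (V : List Int) (u w : Int) (hu : u ∈ V) (hw : w ∈ V) (huw : u < w) :
    pvMA (fccAdjBuild V (fccAdjInit V)) u w ↔ (Int.gcd u w : Int) = 1 := by
  unfold fccAdjBuild
  rw [pvMA_outer]
  have hinit : ¬ pvMA (fccAdjInit V) u w := by
    unfold pvMA fccAdjInit
    rw [pvAdjInit_getD V PySem.Dict.empty (fun u => by simp [pysem]) u]
    simp [PySem.Set.empty]
  constructor
  · rintro (h | ⟨i, hi, j, hj, ⟨⟨hij, hgcd⟩, (⟨rfl, rfl⟩ | ⟨rfl, rfl⟩)⟩⟩)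
    · exact absurd h hinit
    · exact hgcd
    · omega
  · intro h
    exact Or.inr ⟨u, hu, w, hw, ⟨⟨huw, h⟩, Or.inl ⟨rfl, rfl⟩⟩⟩

lemma pvContains_adj (V : List Int) (u w : Int) (hu : u ∈ V) (hw : w ∈ V) (huw : u < w) :
    PySem.Set.contains ((fccAdjBuild V (fccAdjInit V)).getD u PySem.Set.empty) w
      = ((Int.gcd u w : Int) == 1) := by
  rw [Bool.eq_iff_iff, PySem.Set.contains_iff, beq_iff_eq]
  exact pvMA_adj V u w hu hw huw

-- ---- bCombs: basic facts ----

lemma bCombs_succ_nil (r : Nat) : bCombs (r + 1) [] = [] := by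
  rw [bCombs.eq_def, if_neg (by omega), if_pos (by simp)]

lemma bCombs_zero (xs : List Int) : bCombs 0 xs = [[]] := by rw [bCombs.eq_def]; rfl

lemma bCombs_nil_of_lt : ∀ (r : Nat) (xs : List Int), xs.length < r → bCombs r xs = []
  | 0, _, h => absurd h (by omega)
  | r + 1, xs, h => by
    rw [bCombs.eq_def, if_neg (by omega), if_pos h]

lemma bCombs_succ_cons (r : Nat) (x : Int) (xs : List Int) :
    bCombs (r + 1) (x :: xs) = (bCombs r xs).map (fun t => x :: t) ++ bCombs (r + 1) xs := by
  rw [bCombs.eq_def, if_neg (by omega : ¬ r + 1 = 0)]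
  by_cases h : (x :: xs).length < r + 1
  · have h1 : xs.length < r := by simp only [List.length_cons] at h; omega
    rw [if_pos h, bCombs_nil_of_lt r xs h1, bCombs_nil_of_lt (r + 1) xs (by omega)]
    rfl
  · rw [if_neg h]

lemma bCombs_one : ∀ (xs : List Int), bCombs 1 xs = xs.map (fun x => [x])
  | [] => bCombs_succ_nil 0
  | x :: xs => by
    show bCombs (0 + 1) (x :: xs) = _
    rw [bCombs_succ_cons, bCombs_one xs, bCombs_zero]
    rfl

lemma bCombs_two_cons (x : Int) (xs : List Int) :
    bCombs 2 (x :: xs) = (xs.map (fun y => [x, y])) ++ bCombs 2 xs := by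
  show bCombs (1 + 1) (x :: xs) = _
  rw [bCombs_succ_cons, bCombs_one, List.map_map]
  rfl

lemma bCombs_filter (p : Int → Bool) : ∀ (xs : List Int) (r : Nat),
    bCombs r (xs.filter p) = (bCombs r xs).filter (fun t => t.all p)
  | [], r => by
    cases r with
    | zero => rw [bCombs_zero, bCombs_zero]; rfl
    | succ r => simp [List.filter_nil, bCombs_succ_nil]
  | x :: xs, r => by
    cases r with
    | zero => rw [bCombs_zero, bCombs_zero]; rfl
    | succ r =>
      by_cases hp : p x
      · rw [List.filter_cons_of_pos hp, bCombs_succ_cons, bCombs_succ_cons,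
          List.filter_append, List.filter_map, bCombs_filter p xs r, bCombs_filter p xs (r + 1)]
        congr 1
        congr 1
        apply List.filter_congr
        intro t _
        simp [Function.comp, hp]
      · rw [List.filter_cons_of_neg hp, bCombs_succ_cons, List.filter_append, List.filter_map,
          bCombs_filter p xs (r + 1)]
        have : List.filter ((fun t => t.all p) ∘ (fun t => x :: t)) (bCombs r xs) = [] := by
          apply List.filter_eq_nil_iff.mpr
          intro t _
          simp [Function.comp, hp]
        rw [this]
        rfl

lemma sublist_of_mem_bCombs : ∀ (r : Nat) (xs t : List Int), t ∈ bCombs r xs → t.Sublist xs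
  | 0, xs, t, h => by
    have ht : t = [] := by simpa [bCombs_zero] using h
    simp [ht]
  | r + 1, [], t, h => by simp [bCombs_succ_nil] at h
  | r + 1, x :: xs, t, h => by
    rw [bCombs_succ_cons, List.mem_append, List.mem_map] at h
    rcases h with ⟨t', ht', rfl⟩ | h
    · exact (sublist_of_mem_bCombs r xs t' ht').cons₂ x
    · exact (sublist_of_mem_bCombs (r + 1) xs t h).cons x

lemma length_of_mem_bCombs : ∀ (r : Nat) (xs t : List Int), t ∈ bCombs r xs → t.length = r
  | 0, xs, t, h => by
    have ht : t = [] := by simpa [bCombs_zero] using h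
    simp [ht]
  | r + 1, [], t, h => by simp [bCombs_succ_nil] at h
  | r + 1, x :: xs, t, h => by
    rw [bCombs_succ_cons, List.mem_append, List.mem_map] at h
    rcases h with ⟨t', ht', rfl⟩ | h
    · simp [length_of_mem_bCombs r xs t' ht']
    · exact length_of_mem_bCombs (r + 1) xs t h

lemma mem_bCombs_two : ∀ (s p : List Int),
    p ∈ bCombs 2 s ↔ ∃ i j : Nat, i < j ∧ ∃ a b : Int, s[i]? = some a ∧ s[j]? = some b ∧ p = [a, b]
  | [], p => by
    constructor
    · intro h
      simp [show bCombs 2 ([] : List Int) = [] from bCombs_succ_nil 1] at h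
    · rintro ⟨i, j, hij, a, b, ha, _⟩
      simp at ha
  | x :: s, p => by
    rw [bCombs_two_cons, List.mem_append, List.mem_map, mem_bCombs_two s p]
    constructor
    · rintro (⟨y, hy, rfl⟩ | ⟨i, j, hij, a, b, ha, hb, rfl⟩)
      · obtain ⟨j, hj⟩ := List.mem_iff_getElem?.mp hy
        exact ⟨0, j + 1, by omega, x, y, rfl, by simpa using hj, rfl⟩
      · exact ⟨i + 1, j + 1, by omega, a, b, by simpa using ha, by simpa using hb, rfl⟩
    · rintro ⟨i, j, hij, a, b, ha, hb, rfl⟩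
      cases i with
      | zero =>
        left
        have hax : x = a := by simpa using ha
        cases j with
        | zero => omega
        | succ j' =>
          refine ⟨b, List.mem_iff_getElem?.mpr ⟨j', by simpa using hb⟩, by rw [hax]⟩
      | succ i' =>
        right
        cases j with
        | zero => omega
        | succ j' =>
          exact ⟨i', j', by omega, a, b, by simpa using ha, by simpa using hb, rfl⟩

-- ---- pairwise-adjacency predicate for the extend characterisation ----

def pvPW (adj : PySem.Dict Int (PySem.Set Int)) : List Int → Bool
  | [] => true
  | x :: xs => (xs.all (fun y => PySem.Set.contains (adj.getD x PySem.Set.empty) y)) && pvPW adj xs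

lemma pvAll_congr_mem {l : List Int} {f g : Int → Bool} (h : ∀ x ∈ l, f x = g x) :
    l.all f = l.all g := by
  induction l with
  | nil => rfl
  | cons x xs ih =>
    have hx := h x (by simp)
    simp only [List.all_cons, hx, ih (fun y hy => h y (List.mem_cons_of_mem x hy))]

-- ---- the backtracking search equals filtered combinations ----

lemma pvExtLoop (k : Int) (adj : PySem.Dict Int (PySem.Set Int)) (hk : 1 ≤ k) :
    ∀ (N : Nat) (cand current : List Int), cand.length ≤ N →
      (∀ v ∈ cand, ∀ u ∈ current, PySem.Set.contains (adj.getD u PySem.Set.empty) v = true) →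
      current.length ≤ k.toNat →
      (current.length < k.toNat →
        fccLoop k adj current cand =
          ((bCombs (k.toNat - current.length) cand).filter (pvPW adj)).map (fun t => current ++ t)) ∧
      fccExt k adj current cand =
        ((bCombs (k.toNat - current.length) cand).filter (pvPW adj)).map (fun t => current ++ t) := by
  intro N
  induction N using Nat.strong_induction_on with
  | _ N ih =>
    intro cand current hlen hinv hle
    have hloop : current.length < k.toNat →
        fccLoop k adj current cand =
          ((bCombs (k.toNat - current.length) cand).filter (pvPW adj)).map (fun t => current ++ t) := by
      intro hlt
      obtain ⟨m, hm⟩ : ∃ m, k.toNat - current.length = m + 1 :=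
        ⟨k.toNat - current.length - 1, by omega⟩
      match cand, hlen, hinv with
      | [], _, _ =>
        rw [fccLoop, hm, bCombs_succ_nil]
        rfl
      | v :: rest, hlen, hinv =>
        rw [fccLoop]
        by_cases hbr : ((v :: rest).length : Int) < k - (current.length : Int)
        · rw [if_pos hbr]
          have hsmall : (v :: rest).length < k.toNat - current.length := by
            simp only [List.length_cons] at hbr ⊢
            omega
          rw [bCombs_nil_of_lt _ _ hsmall]
          rfl
        · rw [if_neg hbr]
          have hall : (current.all fun u => PySem.Set.contains (adj.getD u PySem.Set.empty) v) = true :=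
            List.all_eq_true.mpr (fun u hu => hinv v (by simp) u hu)
          rw [hall]
          simp only [if_true]
          have hfl := List.length_filter_le
            (fun w => PySem.Set.contains (adj.getD v PySem.Set.empty) w) rest
          have hlenr : rest.length < N := by
            simp only [List.length_cons] at hlen; omega
          have hext := (ih (rest.filter fun w =>
              PySem.Set.contains (adj.getD v PySem.Set.empty) w).length
            (by omega)
            (rest.filter fun w => PySem.Set.contains (adj.getD v PySem.Set.empty) w)
            (current ++ [v]) le_rfl
            (by
              intro w hw u hu
              rcases List.mem_append.mp hu with hu | hu
              · exact hinv w (by simp [(List.mem_filter.mp hw).1]) u hu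
              · have huv : u = v := by simpa using hu
                subst huv
                exact (List.mem_filter.mp hw).2)
            (by simp; omega)).2
          have hrest := (ih rest.length (by omega) rest current le_rfl
            (fun w hw u hu => hinv w (by simp [hw]) u hu) hle).1 hlt
          rw [hext, hrest]
          have hm' : k.toNat - (current ++ [v]).length = m := by simp; omega
          rw [hm', hm, bCombs_succ_cons, List.filter_append, List.filter_map,
            bCombs_filter, List.filter_filter, List.map_append, List.map_map]
          congr 1
          have hfc : List.filter (fun a => pvPW adj a &&
                a.all fun w => PySem.Set.contains (adj.getD v PySem.Set.empty) w) (bCombs m rest)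
              = List.filter (pvPW adj ∘ fun t => v :: t) (bCombs m rest) := by
            apply List.filter_congr
            intro t _
            show _ = pvPW adj (v :: t)
            rw [show pvPW adj (v :: t) = ((t.all fun w =>
              PySem.Set.contains (adj.getD v PySem.Set.empty) w) && pvPW adj t) from rfl]
            exact Bool.and_comm _ _
          rw [hfc]
          apply List.map_congr_left
          intro t _
          simp
    refine ⟨hloop, ?_⟩
    rw [fccExt]
    by_cases hq : current.length = k.toNat
    · have hq' : ((current.length : Int) == k) = true := by
        simp only [beq_iff_eq]
        omega
      rw [hq']
      simp only [if_true]
      rw [hq, Nat.sub_self, bCombs_zero]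
      rw [List.filter_cons, show pvPW adj [] = true from rfl]
      simp
    · have hq' : ((current.length : Int) == k) = false := by
        simp only [beq_eq_false_iff_ne, ne_eq]
        intro hc
        omega
      rw [hq']
      simp only [Bool.false_eq_true, if_false]
      exact hloop (by omega)

lemma pvCliques_eq (n k : Int) (hk : 2 ≤ k) :
    find_coprime_cliques n k =
      (bCombs k.toNat (PySem.List.pyRange 1 (n + 1) 1)).filter
        (pvPW (fccAdjBuild (PySem.List.pyRange 1 (n + 1) 1)
          (fccAdjInit (PySem.List.pyRange 1 (n + 1) 1)))) := by
  unfold find_coprime_cliques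
  rw [if_neg (by omega : ¬ k < 1)]
  have hne : ((k == 1) : Bool) = false := by
    simp only [beq_eq_false_iff_ne, ne_eq]
    omega
  rw [hne]
  simp only [Bool.false_eq_true, if_false]
  have h := (pvExtLoop k
    (fccAdjBuild (PySem.List.pyRange 1 (n + 1) 1) (fccAdjInit (PySem.List.pyRange 1 (n + 1) 1)))
    (by omega) (PySem.List.pyRange 1 (n + 1) 1).length (PySem.List.pyRange 1 (n + 1) 1) []
    le_rfl (by intro v _ u hu; simp at hu) (by simp)).2
  simp only [List.length_nil, Nat.sub_zero] at h
  rw [h]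
  simp

-- ---- colour sets: A's index double loop and B's pair fold agree up to the final check ----

lemma pvMem_nested (l : List Int) (h : Int → List Int) (f : Int → Int → Int) (s0 : PySem.Set Int) (y : Int) :
    y ∈ (l.foldl (fun cs i => (h i).foldl (fun cs j => PySem.Set.add cs (f i j)) cs) s0) ↔
      y ∈ s0 ∨ ∃ i ∈ l, ∃ j ∈ h i, y = f i j := by
  induction l generalizing s0 with
  | nil => simp
  | cons i l ih =>
    rw [List.foldl_cons, ih, PySem.Set.mem_foldl_add]
    simp only [List.mem_cons]
    constructor
    · rintro ((h0 | ⟨j, hj, rfl⟩) | ⟨i', hi', j, hj, rfl⟩)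
      · exact Or.inl h0
      · exact Or.inr ⟨i, Or.inl rfl, j, hj, rfl⟩
      · exact Or.inr ⟨i', Or.inr hi', j, hj, rfl⟩
    · rintro (h0 | ⟨i', (rfl | hi'), j, hj, rfl⟩)
      · exact Or.inl (Or.inl h0)
      · exact Or.inl (Or.inr ⟨j, hj, rfl⟩)
      · exact Or.inr ⟨i', hi', j, hj, rfl⟩

lemma pvNodup_foldl_add {β : Type} (l : List β) (f : β → Int) :
    ∀ (s : PySem.Set Int), s.Nodup → (l.foldl (fun s b => PySem.Set.add s (f b)) s).Nodup := by
  induction l with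
  | nil => intro s hs; exact hs
  | cons b l ih => intro s hs; exact ih _ (PySem.Set.nodup_add s (f b) hs)

lemma pvNodup_nested (l : List Int) (h : Int → List Int) (f : Int → Int → Int) :
    ∀ (s0 : PySem.Set Int), s0.Nodup →
      (l.foldl (fun cs i => (h i).foldl (fun cs j => PySem.Set.add cs (f i j)) cs) s0).Nodup := by
  induction l with
  | nil => intro s0 hs; exact hs
  | cons i l ih => intro s0 hs; exact ih _ (pvNodup_foldl_add (h i) (f i) s0 hs)

lemma pvSetCheck_eq (s t : PySem.Set Int) (hs : s.Nodup) (ht : t.Nodup)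
    (hmem : ∀ y, y ∈ s ↔ y ∈ t) :
    (PySem.Set.len s == 1 && !(PySem.Set.contains s (-1)))
      = (PySem.Set.len t == 1 && !(PySem.Set.contains t (-1))) := by
  have hperm : s.Perm t := (List.perm_ext_iff_of_nodup hs ht).mpr hmem
  have hlen : PySem.Set.len s = PySem.Set.len t := by
    simp [PySem.Set.len, hperm.length_eq]
  have hcon : PySem.Set.contains s (-1) = PySem.Set.contains t (-1) := by
    rw [Bool.eq_iff_iff, PySem.Set.contains_iff, PySem.Set.contains_iff]
    exact hmem (-1)
  rw [hlen, hcon]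

lemma pvColors_eq (d : PySem.Dict (List Int) Int) (s : List Int) :
    (PySem.Set.len (vacColors d s) == 1 && !(PySem.Set.contains (vacColors d s) (-1)))
      = (PySem.Set.len ((bCombs 2 s).foldl (fun cs p => match p with
            | [a, b] => PySem.Set.add cs (d.getD [a, b] (-1))
            | _ => cs) PySem.Set.empty) == 1 &&
         !(PySem.Set.contains ((bCombs 2 s).foldl (fun cs p => match p with
            | [a, b] => PySem.Set.add cs (d.getD [a, b] (-1))
            | _ => cs) PySem.Set.empty) (-1))) := by
  have hshape : ∀ p ∈ bCombs 2 s, ∃ a b : Int, p = [a, b] := by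
    intro p hp
    have h2 := length_of_mem_bCombs 2 s p hp
    match p with
    | [a, b] => exact ⟨a, b, rfl⟩
    | [] => simp at h2
    | [_] => simp at h2
    | _ :: _ :: _ :: _ => simp at h2
  have hfold : (bCombs 2 s).foldl (fun cs p => match p with
      | [a, b] => PySem.Set.add cs (d.getD [a, b] (-1))
      | _ => cs) PySem.Set.empty
      = (bCombs 2 s).foldl (fun cs p => PySem.Set.add cs (d.getD p (-1))) PySem.Set.empty := by
    apply PySem.List.foldl_congr_mem
    intro acc p hp
    obtain ⟨a, b, rfl⟩ := hshape p hp
    rfl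
  rw [hfold]
  have memA : ∀ y : Int, y ∈ vacColors d s ↔ ∃ i ∈ PySem.List.pyRange 0 (s.length : Int) 1,
      ∃ j ∈ PySem.List.pyRange (i + 1) (s.length : Int) 1,
      y = d.getD [PySem.List.pyGetD s i 0, PySem.List.pyGetD s j 0] (-1) := by
    intro y
    unfold vacColors
    rw [pvMem_nested (PySem.List.pyRange 0 (s.length : Int) 1)
      (fun i => PySem.List.pyRange (i + 1) (s.length : Int) 1)
      (fun i j => d.getD [PySem.List.pyGetD s i 0, PySem.List.pyGetD s j 0] (-1)) PySem.Set.empty y]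
    simp [PySem.Set.empty]
  have memB : ∀ y : Int,
      y ∈ (bCombs 2 s).foldl (fun cs p => PySem.Set.add cs (d.getD p (-1))) PySem.Set.empty ↔
      ∃ p ∈ bCombs 2 s, y = d.getD p (-1) := by
    intro y
    rw [PySem.Set.mem_foldl_add]
    simp [PySem.Set.empty]
  apply pvSetCheck_eq
  · exact pvNodup_nested _ _ _ PySem.Set.empty List.nodup_nil
  · exact pvNodup_foldl_add _ _ PySem.Set.empty List.nodup_nil
  · intro y
    rw [memA y, memB y]
    constructor
    · rintro ⟨i, hi, j, hj, rfl⟩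
      rw [PySem.List.mem_pyRange_one] at hi hj
      have h0i : 0 ≤ i := hi.1
      have h0j : 0 ≤ j := by omega
      have hjl : j < (s.length : Int) := hj.2
      have hil : i < (s.length : Int) := by omega
      have hiN : i.toNat < s.length := by omega
      have hjN : j.toNat < s.length := by omega
      rw [PySem.List.pyGetD_eq_getElem s 0 h0i hil, PySem.List.pyGetD_eq_getElem s 0 h0j hjl]
      refine ⟨[s[i.toNat], s[j.toNat]], ?_, rfl⟩
      rw [mem_bCombs_two]
      exact ⟨i.toNat, j.toNat, by omega, s[i.toNat], s[j.toNat],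
        List.getElem?_eq_getElem hiN, List.getElem?_eq_getElem hjN, rfl⟩
    · rintro ⟨p, hp, rfl⟩
      rw [mem_bCombs_two] at hp
      obtain ⟨i, j, hij, a, b, ha, hb, rfl⟩ := hp
      obtain ⟨hjl, hbv⟩ := List.getElem?_eq_some_iff.mp hb
      obtain ⟨hil, hav⟩ := List.getElem?_eq_some_iff.mp ha
      refine ⟨(i : Int), ?_, (j : Int), ?_, ?_⟩
      · rw [PySem.List.mem_pyRange_one]
        constructor <;> [omega; exact_mod_cast hil]
      · rw [PySem.List.mem_pyRange_one]
        constructor <;> [omega; exact_mod_cast hjl]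
      · rw [PySem.List.pyGetD_eq_getElem s 0 (by omega) (by exact_mod_cast hil),
          PySem.List.pyGetD_eq_getElem s 0 (by omega) (by exact_mod_cast hjl)]
        simp only [Int.toNat_natCast]
        rw [hav, hbv]

-- ---- the two outer loops ----

lemma pvPW_eq_all (adjd : PySem.Dict Int (PySem.Set Int)) (V : List Int)
    (hadj : ∀ u w, u ∈ V → w ∈ V → u < w →
      PySem.Set.contains (adjd.getD u PySem.Set.empty) w = ((Int.gcd u w : Int) == 1)) :
    ∀ s : List Int, s.Pairwise (· < ·) → (∀ x ∈ s, x ∈ V) →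
      pvPW adjd s = (bCombs 2 s).all (fun p => match p with
        | [a, b] => ((Int.gcd a b : Int) == 1)
        | _ => true) := by
  intro s
  induction s with
  | nil =>
    intro _ _
    rw [show bCombs 2 ([] : List Int) = [] from bCombs_succ_nil 1]
    rfl
  | cons x xs ih =>
    intro hpw hmem
    rw [bCombs_two_cons, List.all_append, List.all_map]
    show ((xs.all fun y => PySem.Set.contains (adjd.getD x PySem.Set.empty) y) && pvPW adjd xs) = _
    congr 1
    · apply pvAll_congr_mem
      intro y hy
      have hxy : x < y := (List.pairwise_cons.mp hpw).1 y hy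
      have h2 := hadj x y (hmem x (by simp)) (hmem y (by simp [hy])) hxy
      simpa using h2
    · exact ih (List.pairwise_cons.mp hpw).2 (fun y hy => hmem y (by simp [hy]))

lemma pvLoops_eq (d : PySem.Dict (List Int) Int) (adjd : PySem.Dict Int (PySem.Set Int)) (V : List Int)
    (hadj : ∀ u w, u ∈ V → w ∈ V → u < w →
      PySem.Set.contains (adjd.getD u PySem.Set.empty) w = ((Int.gcd u w : Int) == 1)) :
    ∀ (L : List (List Int)), (∀ s ∈ L, s.Pairwise (· < ·) ∧ ∀ x ∈ s, x ∈ V) →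
      vacLoop d (L.filter (pvPW adjd)) = bLoop d L := by
  intro L
  induction L with
  | nil => intro _; rfl
  | cons s ss ih =>
    intro hL
    have hs := hL s (by simp)
    have hss : ∀ t ∈ ss, t.Pairwise (· < ·) ∧ ∀ x ∈ t, x ∈ V := fun t ht => hL t (by simp [ht])
    have hpw := pvPW_eq_all adjd V hadj s hs.1 hs.2
    have hsort : PySem.List.sorted s (fun x => x) false = s :=
      PySem.List.sorted_eq_self_of_pairwise s _ (hs.1.imp le_of_lt)
    by_cases hc : pvPW adjd s = true
    · rw [List.filter_cons_of_pos hc]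
      rw [vacLoop, bLoop, ← hpw, hc]
      simp only [if_true, hsort]
      rw [pvColors_eq d s]
      split
      · rfl
      · exact ih hss
    · rw [List.filter_cons_of_neg hc]
      rw [bLoop, ← hpw]
      rw [Bool.not_eq_true] at hc
      rw [hc]
      simp only [Bool.false_eq_true, if_false]
      exact ih hss

-- ---- the k = 1 branch: no edges, so both sides are vacuously valid ----

lemma pvVacLoop_sing (d : PySem.Dict (List Int) Int) :
    ∀ (l : List Int), vacLoop d (l.map (fun v => [v])) = true := by
  intro l
  induction l with
  | nil => rfl
  | cons v l ih =>
    rw [List.map_cons, vacLoop]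
    have hsort : PySem.List.sorted [v] (fun x => x) false = [v] :=
      PySem.List.sorted_eq_self_of_pairwise [v] _ (List.pairwise_singleton _ _)
    rw [hsort]
    have h0 : vacColors d [v] = PySem.Set.empty := by
      unfold vacColors
      norm_num [PySem.List.pyRange_one]
    rw [h0]
    exact ih

lemma pvBLoop_sing (d : PySem.Dict (List Int) Int) :
    ∀ (l : List Int), bLoop d (l.map (fun v => [v])) = true := by
  intro l
  induction l with
  | nil => rfl
  | cons v l ih =>
    rw [List.map_cons, bLoop, bCombs_nil_of_lt 2 [v] (by simp)]
    exact ih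

-- ===== VERDICT (by name: the statement is the Claim_ definition above) =====
theorem validate_avoiding_coloring_spec : Claim_equal_validate_avoiding_coloring := by
  intro n k coloring _
  unfold Spec_validate_avoiding_coloring validate_avoiding_coloring validate_avoiding_coloring_alt
  by_cases hk1 : k < 1
  · rw [find_coprime_cliques, if_pos hk1, if_pos hk1]
    rfl
  · rw [if_neg hk1]
    by_cases hk2 : k = 1
    · subst hk2
      rw [find_coprime_cliques, if_neg hk1, if_pos (by decide), Int.toNat_one, bCombs_one]
      · rw [pvVacLoop_sing, pvBLoop_sing]
    · have hk : 2 ≤ k := by omega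
      rw [pvCliques_eq n k hk]
      exact pvLoops_eq (PySem.Dict.mk coloring) _ _
        (fun u w hu hw huw => pvContains_adj _ u w hu hw huw)
        (bCombs k.toNat (PySem.List.pyRange 1 (n + 1) 1))
        (fun s hs => ⟨(PySem.List.pairwise_lt_pyRange_one 1 (n + 1)).sublist
            (sublist_of_mem_bCombs _ _ s hs),
          fun x hx => (sublist_of_mem_bCombs _ _ s hs).subset hx⟩)
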